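-- pv_equiv track=rewrite | github.com/YEONOC/kobot11_board-algorithm | heap/heap1.py | solution
-- ===== SOURCE A (Python) =====
-- import heapq
--
-- def solution(scoville, K):
--     answer = 0
--     heapq.heapify(scoville)
--     while scoville[0] < K :
--         if len(scoville) == 1:
--             answer = -1
--             break
--         mins = heapq.heappop(scoville)
--         mins2 = heapq.heappop(scoville)
--         heapq.heappush(scoville, mins+(mins2*2))
--         answer += 1
--     return answer
-- ===== SOURCE B (Python) =====
-- def solution(scoville, K):
--     # Sorted-list variant: sort once, always take the two smallest from the
--     # front, and re-insert the mix at its sorted position by a linear scan.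
--     # (Mutates scoville like A does, but leaves it sorted rather than in heap
--     # order; the equivalence claimed is about the return value.)
--     answer = 0
--     scoville.sort()
--     while scoville[0] < K:
--         if len(scoville) == 1:
--             return -1
--         a = scoville.pop(0)
--         b = scoville.pop(0)
--         mixed = a + b * 2
--         i = 0
--         while i < len(scoville) and scoville[i] < mixed:
--             i += 1
--         scoville.insert(i, mixed)
--         answer += 1
--     return answer
-- ===== Notes on version B (the rewrite author's own statement) =====
-- stated objective: alternative
-- what changed: Replaces the binary heap with a one-time sort plus a sorted list maintained by linear-scan insertion: the two smallest are always the first two elements, so heapify/heappop/heappush disappear.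
import Mathlib
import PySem

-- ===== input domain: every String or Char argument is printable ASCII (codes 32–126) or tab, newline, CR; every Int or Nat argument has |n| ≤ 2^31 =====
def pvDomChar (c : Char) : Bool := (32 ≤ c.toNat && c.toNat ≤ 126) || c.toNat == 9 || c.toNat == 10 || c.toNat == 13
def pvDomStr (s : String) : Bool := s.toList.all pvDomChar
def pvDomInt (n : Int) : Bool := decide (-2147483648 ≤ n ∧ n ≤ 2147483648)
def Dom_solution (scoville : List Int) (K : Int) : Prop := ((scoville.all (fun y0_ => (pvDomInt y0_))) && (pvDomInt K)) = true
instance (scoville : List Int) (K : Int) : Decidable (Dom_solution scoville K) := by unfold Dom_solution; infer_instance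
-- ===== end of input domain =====

-- B replaces A's binary heap with a one-time sort plus a sorted list kept ordered by
-- linear-scan insertion (alternative algorithm, similar cost). Both Pythons mutate
-- `scoville` in place (A leaves heap order, B leaves sorted order); the equivalence
-- proved here is about the RETURN value only.

-- ===== PORT A =====
-- A's heap lives in `scoville` in place; heapq is a standard-library call, ported by its
-- semantics on Int: the heap state is the list's multiset, scoville[0] is its minimum,
-- heappop removes the minimum, heappush adds the element.
def heapRoot (h : List Int) : Int := (h.min?).getD 0

lemma heapRoot_mem {h : List Int} (hne : h ≠ []) : heapRoot h ∈ h := by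
  rcases h with _ | ⟨a, t⟩
  · exact absurd rfl hne
  · have hsome : (a :: t).min?.isSome := by simp [List.min?]
    rcases Option.isSome_iff_exists.mp hsome with ⟨m, hm⟩
    simpa [heapRoot, hm] using List.min?_mem hm

def solLoopA (h : List Int) (K answer : Int) : Int :=
  if hne : h = [] then answer  -- unreachable: Python's scoville[0] raises IndexError on []; Pre_ excludes it
  else if heapRoot h < K then
    if hlen : h.length = 1 then -1
    else
      let mins := heapRoot h
      let h1 := h.erase mins
      let mins2 := heapRoot h1
      let h2 := h1.erase mins2
      solLoopA (h2 ++ [mins + mins2 * 2]) K (answer + 1)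
  else answer
termination_by h.length
decreasing_by
  have h1len : (h.erase (heapRoot h)).length = h.length - 1 :=
    List.length_erase_of_mem (heapRoot_mem hne)
  have hge : 2 ≤ h.length := by
    have h0 : h.length ≠ 0 := fun hc => hne (List.length_eq_zero_iff.mp hc)
    omega
  have h1ne : h.erase (heapRoot h) ≠ [] := by
    intro hc
    have := congrArg List.length hc
    simp [h1len] at this
    omega
  have h2len : ((h.erase (heapRoot h)).erase (heapRoot (h.erase (heapRoot h)))).length
      = (h.erase (heapRoot h)).length - 1 :=
    List.length_erase_of_mem (heapRoot_mem h1ne)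
  simp only [List.length_append, List.length_cons, List.length_nil]
  omega

def solution (scoville : List Int) (K : Int) : Int :=
  solLoopA scoville K 0

-- ===== PORT B =====
-- B's inner while/insert: walk past the elements smaller than x, put x there.
def insertScan (l : List Int) (x : Int) : List Int :=
  match l with
  | [] => [x]
  | a :: t => if a < x then a :: insertScan t x else x :: a :: t

lemma insertScan_length (l : List Int) (x : Int) :
    (insertScan l x).length = l.length + 1 := by
  induction l with
  | nil => simp [insertScan]
  | cons a t ih => by_cases h : a < x <;> simp [insertScan, h, ih]

def solLoopB (s : List Int) (K answer : Int) : Int :=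
  match s with
  | [] => answer  -- unreachable: Python's scoville[0] raises IndexError on []; Pre_ excludes it
  | [a] => if a < K then -1 else answer
  | a :: b :: r =>
    if a < K then solLoopB (insertScan r (a + b * 2)) K (answer + 1)
    else answer
termination_by s.length
decreasing_by simp [insertScan_length]

def solution_alt (scoville : List Int) (K : Int) : Int :=
  solLoopB (PySem.List.sorted scoville (fun x => x) false) K 0

-- ===== PRECONDITION & SPEC =====
-- Pre_ excludes only the empty list, on which Python A raises IndexError at scoville[0].
def Pre_solution (scoville : List Int) (K : Int) : Prop := scoville ≠ []
instance (scoville : List Int) (K : Int) : Decidable (Pre_solution scoville K) := by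
  unfold Pre_solution; infer_instance
def pvWitness_solution : List Int × Int := ([1, 2, 3, 9, 10, 12], 7)

def Spec_solution (scoville : List Int) (K : Int) (out : Int) : Prop := out = solution_alt scoville K
instance (scoville : List Int) (K : Int) (out : Int) : Decidable (Spec_solution scoville K out) := by unfold Spec_solution; infer_instance

-- ===== CLAIM (what is proved, stated in full; the proofs are below) =====
def Claim_equal_solution : Prop := ∀ (scoville : List Int) (K : Int), Dom_solution scoville K → Pre_solution scoville K → Spec_solution scoville K (solution scoville K)

-- ===== LEMMAS AND PROOFS =====

lemma insertScan_perm (l : List Int) (x : Int) : (insertScan l x).Perm (x :: l) := by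
  induction l with
  | nil => simp [insertScan]
  | cons a t ih =>
    by_cases h : a < x
    · simp only [insertScan, if_pos h]
      exact ((ih.cons a).trans (List.Perm.swap x a t))
    · simp [insertScan, h]

lemma insertScan_pairwise {l : List Int} (x : Int) (hl : l.Pairwise (· ≤ ·)) :
    (insertScan l x).Pairwise (· ≤ ·) := by
  induction l with
  | nil => simp [insertScan]
  | cons a t ih =>
    rcases List.pairwise_cons.mp hl with ⟨ha, ht⟩
    by_cases h : a < x
    · simp only [insertScan, if_pos h]
      refine List.pairwise_cons.mpr ⟨?_, ih ht⟩
      intro y hy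
      have : y = x ∨ y ∈ t := by
        have := (insertScan_perm t x).mem_iff.mp hy
        simpa using this
      rcases this with rfl | hyt
      · exact le_of_lt h
      · exact ha y hyt
    · simp only [insertScan, if_neg h]
      rw [not_lt] at h
      refine List.pairwise_cons.mpr ⟨?_, hl⟩
      intro y hy
      rcases List.mem_cons.mp hy with rfl | hyt
      · exact h
      · exact h.trans (ha y hyt)

-- the heap root (min of the multiset) equals the head of any sorted arrangement
lemma heapRoot_of_perm_sorted {h : List Int} {a : Int} {t : List Int}
    (hp : h.Perm (a :: t)) (hs : (a :: t).Pairwise (· ≤ ·)) : heapRoot h = a := by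
  rcases List.pairwise_cons.mp hs with ⟨ha, _⟩
  have hmin : h.min? = some a := by
    refine List.min?_eq_some_iff.mpr ⟨hp.mem_iff.mpr (List.mem_cons_self), ?_⟩
    intro b hb
    rcases List.mem_cons.mp (hp.mem_iff.mp hb) with rfl | hbt
    · exact le_refl _
    · exact ha b hbt
  simp [heapRoot, hmin]

lemma loop_eq (n : Nat) : ∀ (h s : List Int) (K ans : Int), h.length = n →
    h.Perm s → s.Pairwise (· ≤ ·) → solLoopA h K ans = solLoopB s K ans := by
  induction n using Nat.strong_induction_on with
  | _ n ih =>
    intro h s K ans hlen hp hs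
    rcases s with _ | ⟨a, t⟩
    · have : h = [] := List.Perm.eq_nil hp
      subst this
      rw [solLoopA]
      simp [solLoopB]
    · have hne : h ≠ [] := by
        intro hc; subst hc; exact absurd hp.symm.eq_nil (by simp)
      have hroot : heapRoot h = a := heapRoot_of_perm_sorted hp hs
      rcases t with _ | ⟨b, r⟩
      · -- singleton
        have h1 : h.length = 1 := by simpa using hp.length_eq
        rw [solLoopA]
        simp only [dif_neg hne, hroot, solLoopB]
        by_cases hk : a < K
        · simp [hk, h1]
        · simp [hk]
      · -- at least two elements
        have hlen2 : h.length = r.length + 2 := by simpa using hp.length_eq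
        have hp1 : (h.erase a).Perm (b :: r) := by
          have hh := hp.erase a
          rwa [List.erase_cons_head] at hh
        have hs1 : (b :: r).Pairwise (· ≤ ·) := (List.pairwise_cons.mp hs).2
        have hroot1 : heapRoot (h.erase a) = b := heapRoot_of_perm_sorted hp1 hs1
        have hp2 : ((h.erase a).erase b).Perm r := by
          have hh := hp1.erase b
          rwa [List.erase_cons_head] at hh
        have hperm3 : ((h.erase a).erase b ++ [a + b * 2]).Perm (insertScan r (a + b * 2)) :=
          ((hp2.append_right _).trans (List.perm_append_singleton _ _)).trans
            (insertScan_perm r (a + b * 2)).symm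
        have hsort3 : (insertScan r (a + b * 2)).Pairwise (· ≤ ·) :=
          insertScan_pairwise _ ((List.pairwise_cons.mp hs1).2)
        have hlen3 : ((h.erase a).erase b ++ [a + b * 2]).length = r.length + 1 := by
          have := hp2.length_eq
          simp [this]
        by_cases hk : a < K
        · have hlen1 : h.length ≠ 1 := by omega
          rw [solLoopA]
          simp only [dif_neg hne, hroot, hroot1, if_pos hk, dif_neg hlen1]
          rw [show solLoopB (a :: b :: r) K ans
                = solLoopB (insertScan r (a + b * 2)) K (ans + 1) by
              rw [solLoopB]; simp [hk]]
          exact ih (r.length + 1) (by omega) _ _ K (ans + 1) hlen3 hperm3 hsort3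
        · rw [solLoopA]
          simp only [dif_neg hne, hroot, if_neg hk]
          rw [solLoopB]
          simp [hk]

-- ===== VERDICT (by name: the statement is the Claim_ definition above) =====
theorem solution_spec : Claim_equal_solution := by
  intro scoville K _ _
  unfold Spec_solution solution solution_alt
  refine loop_eq scoville.length scoville _ K 0 rfl ?_ ?_
  · exact (PySem.List.sorted_perm scoville (fun x => x) false).symm
  · simpa using PySem.List.sorted_pairwise scoville (fun x => x)
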